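-- pv_equiv track=rewrite | github.com/TheBitcoinBreakdown-95/thebitcoinbreakdown.com | btc-index/mcp/chunker.py | _chunk_at_header_level
-- ===== SOURCE A (Python) =====
-- def _chunk_at_header_level(lines: list[str], header_prefix: str) -> list[tuple[str, int, int, str]]:
--     """Split lines at a given header level. Returns (heading, start, end, text) tuples."""
--     sections = []
--     current_heading = "Preamble"
--     current_lines = []
--     current_start = 1
--
--     for i, line in enumerate(lines, start=1):
--         if line.startswith(header_prefix) and not line.startswith(header_prefix + "#"):
--             # Flush previous section
--             text = "\n".join(current_lines).strip()
--             if text: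
--                 sections.append((current_heading, current_start, i - 1, text))
--             current_heading = line.lstrip("#").strip()
--             current_lines = [line]
--             current_start = i
--         else:
--             current_lines.append(line)
--
--     # Flush last section
--     text = "\n".join(current_lines).strip()
--     if text:
--         sections.append((current_heading, current_start, len(lines), text))
--
--     return sections
-- ===== SOURCE B (Python) =====
-- def _chunk_at_header_level(lines: list[str], header_prefix: str) -> list[tuple[str, int, int, str]]:
--     """Two-phase rewrite: first collect all boundary headers, then carve the
--     line range into segments between consecutive boundaries."""
--     n = len(lines)
--     segs = [("Preamble", 1)] + [
--         (line.lstrip("#").strip(), i)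
--         for i, line in enumerate(lines, 1)
--         if line.startswith(header_prefix) and not line.startswith(header_prefix + "#")
--     ]
--     sections = []
--     for j, (heading, start) in enumerate(segs):
--         end = segs[j + 1][1] - 1 if j + 1 < len(segs) else n
--         text = "\n".join(lines[start - 1 : end]).strip()
--         if text:
--             sections.append((heading, start, end, text))
--     return sections
-- ===== Notes on version B (the rewrite author's own statement) =====
-- stated objective: alternative
-- what changed: Replaces A's single streaming pass with mutable flush state by a two-phase decomposition: one pass collects the (heading, index) boundary list, then a second loop carves segments between consecutive boundaries and slices the text directly out of lines.
import Mathlib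
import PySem

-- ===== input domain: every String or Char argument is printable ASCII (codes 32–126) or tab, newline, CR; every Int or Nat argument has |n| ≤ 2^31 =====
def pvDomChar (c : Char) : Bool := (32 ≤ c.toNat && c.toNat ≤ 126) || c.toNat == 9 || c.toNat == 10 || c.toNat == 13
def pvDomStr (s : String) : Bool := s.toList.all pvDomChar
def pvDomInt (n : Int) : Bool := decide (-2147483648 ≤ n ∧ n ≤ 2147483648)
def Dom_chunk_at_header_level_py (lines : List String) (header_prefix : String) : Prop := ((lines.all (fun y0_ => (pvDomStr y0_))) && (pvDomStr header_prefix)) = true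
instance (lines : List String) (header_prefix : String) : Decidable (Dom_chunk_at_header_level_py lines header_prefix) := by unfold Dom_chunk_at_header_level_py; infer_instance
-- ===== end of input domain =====

-- B replaces A's single streaming pass (mutable flush state) by a two-phase
-- decomposition: collect the (heading, index) boundary list, then carve
-- segments between consecutive boundaries, slicing the text out of `lines`.

-- shared primitive helpers (exact ports of the Python expressions)
-- line.startswith(hp) and not line.startswith(hp + "#")
def pvIsHdr (hp : String) (line : String) : Bool :=
  PySem.Chars.startswith line.toList hp.toList &&
    !(PySem.Chars.startswith line.toList (hp.toList ++ ['#']))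

-- line.lstrip("#").strip()   (lstrip with the single char '#' ported by hand as
-- dropWhile on the code points — exact for a one-character strip set)
def pvHeadingOf (line : String) : String :=
  String.ofList (PySem.Chars.strip (line.toList.dropWhile (fun c => c == '#')))

-- ===== PORT A =====
-- the for-loop of A, state = (sections, current_heading, current_lines, current_start);
-- the final flush (end = len(lines) = n) is the base case
def chunkLoopA (hp : String) (n : Int) (i : Int) (rest : List String)
    (secs : List (String × Int × Int × String)) (h : String) (cur : List String) (s : Int) :
    List (String × Int × Int × String) :=
  match rest with
  | [] =>
    let text := PySem.Str.strip (PySem.Str.join "\n" cur)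
    if text ≠ "" then secs ++ [(h, s, n, text)] else secs
  | line :: rest' =>
    if pvIsHdr hp line then
      let text := PySem.Str.strip (PySem.Str.join "\n" cur)
      let secs' := if text ≠ "" then secs ++ [(h, s, i - 1, text)] else secs
      chunkLoopA hp n (i + 1) rest' secs' (pvHeadingOf line) [line] i
    else
      chunkLoopA hp n (i + 1) rest' secs h (cur ++ [line]) s

def chunk_at_header_level_py (lines : List String) (header_prefix : String) : List (String × Int × Int × String) :=
  chunkLoopA header_prefix (lines.length : Int) 1 lines [] "Preamble" [] 1

-- ===== PORT B =====
-- phase 1 of Source B: the boundary comprehension [(heading, i) for i, line in enumerate(lines, 1) if …]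
def pvBounds (hp : String) (i : Int) (rest : List String) : List (String × Int) :=
  match rest with
  | [] => []
  | line :: rest' =>
    (if pvIsHdr hp line then [(pvHeadingOf line, i)] else []) ++ pvBounds hp (i + 1) rest'

-- phase 2 of Source B: carve; `end` peeks at the next boundary (segs[j+1]) or is n
def pvCarve (lines : List String) (n : Int) (segs : List (String × Int)) :
    List (String × Int × Int × String) :=
  match segs with
  | [] => []
  | (h, s) :: rest =>
    let e : Int := match rest with | [] => n | (_, s') :: _ => s' - 1
    let text := PySem.Str.strip (PySem.Str.join "\n" (PySem.List.slice lines (some (s - 1)) (some e)))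
    (if text ≠ "" then [(h, s, e, text)] else []) ++ pvCarve lines n rest

def chunk_at_header_level_py_alt (lines : List String) (header_prefix : String) : List (String × Int × Int × String) :=
  pvCarve lines (lines.length : Int) (("Preamble", 1) :: pvBounds header_prefix 1 lines)

-- ===== PRECONDITION & SPEC =====
def Spec_chunk_at_header_level_py (lines : List String) (header_prefix : String) (out : List (String × Int × Int × String)) : Prop := out = chunk_at_header_level_py_alt lines header_prefix
instance (lines : List String) (header_prefix : String) (out : List (String × Int × Int × String)) : Decidable (Spec_chunk_at_header_level_py lines header_prefix out) := by unfold Spec_chunk_at_header_level_py; infer_instance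

-- ===== CLAIM (what is proved, stated in full; the proofs are below) =====
def Claim_equal_chunk_at_header_level_py : Prop := ∀ (lines : List String) (header_prefix : String), Dom_chunk_at_header_level_py lines header_prefix → Spec_chunk_at_header_level_py lines header_prefix (chunk_at_header_level_py lines header_prefix)

-- ===== LEMMAS AND PROOFS =====

-- the accumulator of A's loop is a pure prefix
theorem chunkLoopA_acc (hp : String) (n : Int) (rest : List String) :
    ∀ (i : Int) (secs : List (String × Int × Int × String)) (h : String)
      (cur : List String) (s : Int),
    chunkLoopA hp n i rest secs h cur s = secs ++ chunkLoopA hp n i rest [] h cur s := by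
  induction rest with
  | nil =>
    intro i secs h cur s
    simp only [chunkLoopA]
    split_ifs <;> simp
  | cons line rest' ih =>
    intro i secs h cur s
    simp only [chunkLoopA]
    split_ifs with hb ht
    · rw [ih]; conv_rhs => rw [ih]
      simp [List.append_assoc]
    · rw [ih]
    · exact ih _ _ _ _ _

-- main invariant: A's loop from state (h, cur = lines[a:k], start = a+1) at line k+1
-- equals B's carve of the remaining boundaries
theorem chunkLoopA_eq_carve (L : List String) (hp : String) :
    ∀ (rest : List String) (k a : Nat) (h : String),
    a ≤ k → k ≤ L.length → rest = L.drop k →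
    chunkLoopA hp (L.length : Int) ((k : Int) + 1) rest [] h ((L.take k).drop a) ((a : Int) + 1)
      = pvCarve L (L.length : Int) ((h, (a : Int) + 1) :: pvBounds hp ((k : Int) + 1) rest) := by
  intro rest
  induction rest with
  | nil =>
    intro k a h hak hkL hdrop
    have hk : k = L.length := by
      have h2 := List.drop_eq_nil_iff.mp hdrop.symm
      omega
    subst hk
    simp only [chunkLoopA, pvBounds, pvCarve]
    have e1 : ((L.length : Int) + 1 - 1) = (L.length : Int) := by ring
    have hsl : PySem.List.slice L (some ((a : Int) + 1 - 1)) (some (L.length : Int)) =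
        (L.take L.length).drop a := by
      have e2 : ((a : Int) + 1 - 1) = ((a : Nat) : Int) := by ring
      rw [e2, PySem.List.slice_natCast, List.take_of_length_le (le_refl L.length)]
      exact List.take_of_length_le (by simp)
    rw [hsl]
    split_ifs <;> simp
  | cons line rest' ih =>
    intro k a h hak hkL hdrop
    have hklt : k < L.length := by
      rcases Nat.lt_or_ge k L.length with h' | h'
      · exact h'
      · rw [List.drop_eq_nil_iff.mpr (by omega)] at hdrop
        cases hdrop
    have hcons : line :: rest' = L[k] :: L.drop (k + 1) :=
      hdrop.symm.symm.trans (List.drop_eq_getElem_cons hklt)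
    injection hcons with hline hrest'
    have htake : L.take (k + 1) = L.take k ++ [line] := by
      rw [List.take_add_one]
      simp [List.getElem?_eq_getElem hklt, hline]
    simp only [chunkLoopA, pvBounds]
    by_cases hb : pvIsHdr hp line = true
    · simp only [hb, if_true]
      rw [chunkLoopA_acc]
      have hcur : [line] = (L.take (k + 1)).drop k := by
        rw [htake, List.drop_append]
        simp [List.length_take, Nat.min_eq_left hklt.le]
      have hcast : ((k : Int) + 1 + 1) = (((k + 1 : Nat) : Int) + 1) := by push_cast; ring
      have hIH := ih (k + 1) k (pvHeadingOf line) (Nat.le_succ k) (by omega) hrest'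
      rw [hcur, hcast, hIH]
      -- unfold both pvCarve heads and align the casts
      simp only [pvCarve, List.singleton_append, List.nil_append]
      push_cast
      have e1 : ((k : Int) + 1 - 1) = ((k : Nat) : Int) := by ring
      have e2 : ((a : Int) + 1 - 1) = ((a : Nat) : Int) := by ring
      rw [e1, e2, PySem.List.slice_natCast, ← List.drop_take]
    · simp only [hb]
      have hcur : (L.take k).drop a ++ [line] = (L.take (k + 1)).drop a := by
        rw [htake, List.drop_append]
        simp [List.length_take, Nat.min_eq_left hklt.le, Nat.sub_eq_zero_of_le hak]
      have hcast : ((k : Int) + 1 + 1) = (((k + 1 : Nat) : Int) + 1) := by push_cast; ring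
      have hIH := ih (k + 1) a h (by omega) (by omega) hrest'
      rw [hcur, hcast, hIH]
      simp only [List.nil_append]
      push_cast
      rfl

-- ===== VERDICT (by name: the statement is the Claim_ definition above) =====
theorem chunk_at_header_level_py_spec : Claim_equal_chunk_at_header_level_py := by
  intro lines hp _
  unfold Spec_chunk_at_header_level_py chunk_at_header_level_py chunk_at_header_level_py_alt
  have := chunkLoopA_eq_carve lines hp lines 0 0 "Preamble" (le_refl 0) (Nat.zero_le _) rfl
  simpa using this
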